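-- pv_equiv track=rewrite | github.com/Beki95/GEEKTECH | dz/chess.py | hod_ver_or_gor
-- ===== SOURCE A (Python) =====
-- the_board_ = [[11, 21, 31, 41, 51, 61, 71, 81],
--               [12, 22, 32, 42, 52, 62, 72, 82],
--               [13, 23, 33, 43, 53, 63, 73, 83],
--               [14, 24, 34, 44, 54, 64, 74, 84],
--               [15, 25, 35, 45, 55, 65, 75, 85],
--               [16, 26, 36, 46, 56, 66, 76, 86],
--               [17, 27, 37, 47, 57, 67, 77, 87],
--               [18, 28, 38, 48, 58, 68, 78, 88]]
--
-- def hod_ver_or_gor(hod):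
--     index_f = 0
--     index_l = 0
--     l1 = None
--     for i in the_board_:
--         for x in i:
--             if hod == x:
--                 l1 = i
--                 index_l = the_board_.index(i)
--                 index_f = i.index(hod)
--     l = [i[index_f] for i in the_board_]
--     l.extend(l1)
--     return l, index_f, index_l
-- ===== SOURCE B (Python) =====
-- # Closed-form: the board cell at row r, column c holds (c+1)*10 + (r+1), so no board
-- # or scanning is needed at all -- everything is arithmetic on divmod(hod, 10).
-- def hod_ver_or_gor(hod):
--     q, r = divmod(hod, 10)          # tens digit = column+1, units digit = row+1
--     if not (1 <= q <= 8 and 1 <= r <= 8):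
--         raise ValueError("value is not on the board")
--     l = [q * 10 + k for k in range(1, 9)]        # the column of hod
--     l += [c * 10 + r for c in range(1, 9)]       # the row of hod
--     return l, q - 1, r - 1
-- ===== Notes on version B (the rewrite author's own statement) =====
-- stated objective: alternative
-- what changed: Drops the board and all scanning entirely: since cell (r,c) holds (c+1)*10+(r+1), B computes the indices and both output lists in closed form from divmod(hod, 10).
import Mathlib
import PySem

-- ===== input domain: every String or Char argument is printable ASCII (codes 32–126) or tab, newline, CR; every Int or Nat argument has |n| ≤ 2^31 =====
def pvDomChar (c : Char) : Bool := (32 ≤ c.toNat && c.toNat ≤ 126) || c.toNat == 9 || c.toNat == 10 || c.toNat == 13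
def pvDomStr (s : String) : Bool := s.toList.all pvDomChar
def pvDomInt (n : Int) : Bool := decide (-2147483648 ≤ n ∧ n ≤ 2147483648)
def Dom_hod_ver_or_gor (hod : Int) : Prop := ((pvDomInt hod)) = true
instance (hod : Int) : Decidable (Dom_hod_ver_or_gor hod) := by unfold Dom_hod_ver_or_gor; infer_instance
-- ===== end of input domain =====

-- B drops the board entirely: cell (r,c) holds (c+1)*10+(r+1), so indices and both output
-- lists are computed in closed form from divmod(hod,10); equal on board values (Pre_),
-- both Pythons raise off the board (A: TypeError, B: ValueError).

def pvBoard : List (List Int) :=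
  [[11, 21, 31, 41, 51, 61, 71, 81],
   [12, 22, 32, 42, 52, 62, 72, 82],
   [13, 23, 33, 43, 53, 63, 73, 83],
   [14, 24, 34, 44, 54, 64, 74, 84],
   [15, 25, 35, 45, 55, 65, 75, 85],
   [16, 26, 36, 46, 56, 66, 76, 86],
   [17, 27, 37, 47, 57, 67, 77, 87],
   [18, 28, 38, 48, 58, 68, 78, 88]]

-- ===== PORT A =====
-- state of A's loop: (index_f, index_l, l1)
def hod_ver_or_gor (hod : Int) : List Int × Int × Int :=
  let s := pvBoard.foldl (fun s i =>
    i.foldl (fun s x =>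
      if hod == x then
        ((((PySem.List.index? i hod).getD 0 : Nat) : Int),
         (((PySem.List.index? pvBoard i).getD 0 : Nat) : Int),
         some i)
      else s) s)
    ((0 : Int), (0 : Int), (none : Option (List Int)))
  let l := pvBoard.map (fun i => PySem.List.pyGetD i s.1 0)
  -- l.extend(l1): Python raises TypeError when l1 is None (excluded by Pre_); we append nothing there
  (l ++ s.2.2.getD [], s.1, s.2.1)

-- ===== PORT B =====
def hod_ver_or_gor_alt (hod : Int) : List Int × Int × Int :=
  let q := PySem.Int.floordiv hod 10
  let r := PySem.Int.mod hod 10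
  if 1 ≤ q ∧ q ≤ 8 ∧ 1 ≤ r ∧ r ≤ 8 then
    let l := (PySem.List.pyRange 1 9 1).map (fun k => q * 10 + k) ++
             (PySem.List.pyRange 1 9 1).map (fun c => c * 10 + r)
    (l, q - 1, r - 1)
  else
    ([], 0, 0)  -- Python B raises ValueError here (excluded by Pre_)

-- ===== PRECONDITION & SPEC =====
-- Pre_ excludes exactly the off-board inputs, on which BOTH Pythons raise (A: TypeError, B: ValueError).
def Pre_hod_ver_or_gor (hod : Int) : Prop :=
  1 ≤ PySem.Int.mod hod 10 ∧ PySem.Int.mod hod 10 ≤ 8 ∧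
  1 ≤ PySem.Int.floordiv hod 10 ∧ PySem.Int.floordiv hod 10 ≤ 8
instance (hod : Int) : Decidable (Pre_hod_ver_or_gor hod) := by unfold Pre_hod_ver_or_gor; infer_instance
def pvWitness_hod_ver_or_gor : Int := 34

def Spec_hod_ver_or_gor (hod : Int) (out : List Int × Int × Int) : Prop := out = hod_ver_or_gor_alt hod
instance (hod : Int) (out : List Int × Int × Int) : Decidable (Spec_hod_ver_or_gor hod out) := by unfold Spec_hod_ver_or_gor; infer_instance

-- ===== CLAIM =====
def Claim_equal_hod_ver_or_gor : Prop := ∀ (hod : Int), Dom_hod_ver_or_gor hod → Pre_hod_ver_or_gor hod → Spec_hod_ver_or_gor hod (hod_ver_or_gor hod)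

-- ===== LEMMAS AND PROOFS =====

lemma pre_bounds (hod : Int) (h : Pre_hod_ver_or_gor hod) : 11 ≤ hod ∧ hod ≤ 88 := by
  obtain ⟨h1, h2, h3, h4⟩ := h
  have := PySem.Int.floordiv_mul_add_mod hod 10
  omega

-- ===== VERDICT =====
set_option maxRecDepth 8192 in
set_option maxHeartbeats 2000000 in
theorem hod_ver_or_gor_spec : Claim_equal_hod_ver_or_gor := by
  intro hod _ hpre
  obtain ⟨hlo, hhi⟩ := pre_bounds hod hpre
  unfold Spec_hod_ver_or_gor
  interval_cases hod <;> revert hpre <;> decide
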